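-- pv_equiv track=rewrite | github.com/omakoto/misc | golang-dump-formatter.py | tokenize_go_dump
-- ===== SOURCE A (Python) =====
-- def tokenize_go_dump(text):
--     """
--     A state-machine lexer that distinguishes between Go syntax and
--     content inside string literals.
--     """
--     tokens = []
--     buffer = []
--     in_string = False
--     escaped = False
--
--     for char in text:
--         if in_string:
--             buffer.append(char)
--             if escaped:
--                 escaped = False
--             elif char == '\\':
--                 escaped = True
--             elif char == '"':
--                 in_string = False
--                 tokens.append(("STRING", "".join(buffer)))
--                 buffer = []
--         else:
--             if char == '"':
--                 if buffer:
--                     tokens.append(("TEXT", "".join(buffer).strip()))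
--                     buffer = []
--                 in_string = True
--                 buffer.append(char)
--             elif char in "{},":
--                 if buffer:
--                     tokens.append(("TEXT", "".join(buffer).strip()))
--                     buffer = []
--                 tokens.append(("SYNTAX", char))
--             else:
--                 buffer.append(char)
--
--     if buffer:
--         tokens.append(("TEXT", "".join(buffer).strip()))
--
--     return [t for t in tokens if t[1]] # Filter empty strings
-- ===== SOURCE B (Python) =====
-- def _scan_string(text, i):
--     """text[i] == '"'. Return (end index exclusive, closed?) of the string
--     literal starting at i, honouring backslash escapes."""
--     n = len(text)
--     j = i + 1
--     while j < n:
--         c = text[j]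
--         if c == '"':
--             return j + 1, True
--         if c == '\\':
--             j += 2
--         else:
--             j += 1
--     return n, False
--
--
-- def tokenize_go_dump(text):
--     """Slice-based scanner: jump from delimiter to delimiter instead of
--     feeding a character state machine."""
--     tokens = []
--     n = len(text)
--     i = 0
--     while i < n:
--         c = text[i]
--         if c in '{},':
--             tokens.append(('SYNTAX', c))
--             i += 1
--         elif c == '"':
--             j, closed = _scan_string(text, i)
--             if closed:
--                 tokens.append(('STRING', text[i:j]))
--             else:
--                 t = text[i:j].strip()
--                 if t:
--                     tokens.append(('TEXT', t))
--             i = j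
--         else:
--             j = i + 1
--             while j < n and text[j] not in '"{},':
--                 j += 1
--             t = text[i:j].strip()
--             if t:
--                 tokens.append(('TEXT', t))
--             i = j
--     return tokens
-- ===== Notes on version B (the rewrite author's own statement) =====
-- stated objective: alternative
-- what changed: A feeds every character through a four-field state machine (tokens/buffer/in_string/escaped); B scans by jumping from delimiter to delimiter, slicing out a whole string literal (via a dedicated escape-aware scanner) or a whole text run at a time, and emits each token directly with no carried buffer or flag state.
import Mathlib
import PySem

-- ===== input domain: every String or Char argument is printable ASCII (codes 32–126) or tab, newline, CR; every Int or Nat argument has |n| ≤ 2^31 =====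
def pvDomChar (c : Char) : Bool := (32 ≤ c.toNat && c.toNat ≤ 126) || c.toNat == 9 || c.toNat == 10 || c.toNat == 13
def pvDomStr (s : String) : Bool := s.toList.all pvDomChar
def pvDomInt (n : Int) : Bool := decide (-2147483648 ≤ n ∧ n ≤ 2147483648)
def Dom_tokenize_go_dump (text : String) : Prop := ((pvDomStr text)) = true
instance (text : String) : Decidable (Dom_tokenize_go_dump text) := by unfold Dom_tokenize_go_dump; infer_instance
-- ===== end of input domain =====

-- B replaces A's per-character state machine by a slice-based scanner that jumps
-- from delimiter to delimiter (objective: alternative decomposition, same cost).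


-- ===== PORT A =====
-- one step of A's for-loop: state = (tokens, buffer, in_string, escaped)
def pvStepA (st : List (String × String) × List Char × Bool × Bool) (ch : Char) :
    List (String × String) × List Char × Bool × Bool :=
  let tokens := st.1
  let buffer := st.2.1
  let inString := st.2.2.1
  let escaped := st.2.2.2
  if inString then
    let buffer := buffer ++ [ch]
    if escaped then (tokens, buffer, true, false)
    else if ch = '\\' then (tokens, buffer, true, true)
    else if ch = '"' then (tokens ++ [("STRING", String.ofList buffer)], [], false, false)
    else (tokens, buffer, true, escaped)
  else
    if ch = '"' then
      let tokens := if buffer ≠ [] then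
        tokens ++ [("TEXT", String.ofList (PySem.Chars.strip buffer))] else tokens
      (tokens, ['"'], true, escaped)
    else if ch = '{' ∨ ch = '}' ∨ ch = ',' then
      let tokens := if buffer ≠ [] then
        tokens ++ [("TEXT", String.ofList (PySem.Chars.strip buffer))] else tokens
      (tokens ++ [("SYNTAX", String.ofList [ch])], [], false, escaped)
    else (tokens, buffer ++ [ch], false, escaped)

-- the tail flush of the buffer and the final `[t for t in tokens if t[1]]` filter
def pvFinishA (st : List (String × String) × List Char × Bool × Bool) :
    List (String × String) :=
  let tokens := if st.2.1 ≠ [] then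
    st.1 ++ [("TEXT", String.ofList (PySem.Chars.strip st.2.1))] else st.1
  tokens.filter (fun t => t.2 ≠ "")

def tokenize_go_dump (text : String) : List (String × String) :=
  pvFinishA (text.toList.foldl pvStepA ([], [], false, false))

-- ===== PORT B =====
-- _scan_string: after the opening quote, consume to the closing quote (escapes in
-- pairs); returns (chars of the literal scanned so far incl. quotes, rest, closed?)
def pvScanStr (acc : List Char) : List Char → List Char × List Char × Bool
  | [] => (acc, [], false)
  | c :: rest =>
    if c = '"' then (acc ++ [c], rest, true)
    else if c = '\\' then
      match rest with
      | [] => (acc ++ [c], [], false)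
      | d :: rest' => pvScanStr (acc ++ [c, d]) rest'
    else pvScanStr (acc ++ [c]) rest

-- the rest returned by pvScanStr is a suffix-length bound (needed for termination)
theorem pvScanStr_rest_le_aux : ∀ (n : Nat) (acc l : List Char), l.length ≤ n →
    (pvScanStr acc l).2.1.length ≤ l.length := by
  intro n
  induction n with
  | zero =>
    intro acc l h
    have hl : l = [] := by cases l <;> simp_all
    subst hl; rw [pvScanStr.eq_def]
  | succ n ih =>
    intro acc l h
    cases l with
    | nil => rw [pvScanStr.eq_def]
    | cons c rest =>
      by_cases h1 : c = '"'
      · rw [pvScanStr.eq_def]; simp [h1]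
      · by_cases h2 : c = '\\'
        · cases rest with
          | nil => rw [pvScanStr.eq_def]; simp [h2]
          | cons d rest' =>
            have := ih (acc ++ [c, d]) rest' (by simp at h; omega)
            rw [pvScanStr.eq_def]; simp only [if_neg h1, if_pos h2]
            simp at this ⊢; omega
        · have := ih (acc ++ [c]) rest (by simp at h; omega)
          rw [pvScanStr.eq_def]; simp only [if_neg h1, if_neg h2]
          simp at this ⊢; omega

theorem pvScanStr_rest_le (acc l : List Char) :
    (pvScanStr acc l).2.1.length ≤ l.length :=
  pvScanStr_rest_le_aux l.length acc l le_rfl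

def pvIsText (c : Char) : Bool := !(c = '"' || c = '{' || c = '}' || c = ',')

-- main loop of B: dispatch on the first character, consume a whole chunk at a time
def pvGoB : List Char → List (String × String)
  | [] => []
  | c :: rest =>
    if c = '{' ∨ c = '}' ∨ c = ',' then
      ("SYNTAX", String.ofList [c]) :: pvGoB rest
    else if c = '"' then
      let r := pvScanStr [c] rest
      if r.2.2 then ("STRING", String.ofList r.1) :: pvGoB r.2.1
      else
        let t := PySem.Chars.strip r.1
        (if t ≠ [] then [("TEXT", String.ofList t)] else []) ++ pvGoB r.2.1
    else
      let run := c :: rest.takeWhile pvIsText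
      let t := PySem.Chars.strip run
      (if t ≠ [] then [("TEXT", String.ofList t)] else []) ++ pvGoB (rest.dropWhile pvIsText)
  termination_by l => l.length
  decreasing_by
  all_goals simp only [List.length_cons]
  all_goals first
    | omega
    | (have := pvScanStr_rest_le [c] rest; omega)
    | (have := rest.length_dropWhile_le pvIsText; omega)

def tokenize_go_dump_alt (text : String) : List (String × String) :=
  pvGoB text.toList

-- ===== PRECONDITION & SPEC =====
def Spec_tokenize_go_dump (text : String) (out : List (String × String)) : Prop := out = tokenize_go_dump_alt text
instance (text : String) (out : List (String × String)) : Decidable (Spec_tokenize_go_dump text out) := by unfold Spec_tokenize_go_dump; infer_instance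

-- ===== CLAIM (what is proved, stated in full; the proofs are below) =====
def Claim_equal_tokenize_go_dump : Prop := ∀ (text : String), Dom_tokenize_go_dump text → Spec_tokenize_go_dump text (tokenize_go_dump text)

-- ===== LEMMAS AND PROOFS =====

-- the (already filtered) TEXT token a flushed buffer contributes
def pvEmit (buf : List Char) : List (String × String) :=
  if PySem.Chars.strip buf ≠ [] then [("TEXT", String.ofList (PySem.Chars.strip buf))] else []

-- reference tokenizer in continuation style: text mode with carried buffer / string mode
mutual
def pvGoT : List Char → List Char → List (String × String)
  | buf, [] => pvEmit buf
  | buf, c :: l =>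
    if c = '"' then pvEmit buf ++ pvGoS ['"'] false l
    else if c = '{' ∨ c = '}' ∨ c = ',' then
      pvEmit buf ++ ("SYNTAX", String.ofList [c]) :: pvGoT [] l
    else pvGoT (buf ++ [c]) l
def pvGoS : List Char → Bool → List Char → List (String × String)
  | acc, _, [] => pvEmit acc
  | acc, esc, c :: l =>
    if esc then pvGoS (acc ++ [c]) false l
    else if c = '\\' then pvGoS (acc ++ [c]) true l
    else if c = '"' then ("STRING", String.ofList (acc ++ [c])) :: pvGoT [] l
    else pvGoS (acc ++ [c]) esc l
end

theorem pvFilter_flush (tokens : List (String × String)) (buf : List Char) :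
    (if buf ≠ [] then tokens ++ [("TEXT", String.ofList (PySem.Chars.strip buf))] else tokens).filter
        (fun t => t.2 ≠ "") =
      tokens.filter (fun t => t.2 ≠ "") ++ pvEmit buf := by
  by_cases hb : buf = []
  · subst hb
    simp [pvEmit, show PySem.Chars.strip ([] : List Char) = [] from by decide]
  · rw [if_pos hb, List.filter_append]
    congr 1
    by_cases hs : PySem.Chars.strip buf = [] <;>
      simp [pvEmit, hs, String.ofList_eq_empty_iff]

-- A's fold, related to the continuation-style reference tokenizer
theorem pvA_run (l : List Char) :
    (∀ tokens buf, pvFinishA (l.foldl pvStepA (tokens, buf, false, false)) =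
        tokens.filter (fun t => t.2 ≠ "") ++ pvGoT buf l) ∧
    (∀ tokens acc esc, pvFinishA (l.foldl pvStepA (tokens, acc, true, esc)) =
        tokens.filter (fun t => t.2 ≠ "") ++ pvGoS acc esc l) := by
  induction l with
  | nil =>
    refine ⟨fun tokens buf => ?_, fun tokens acc esc => ?_⟩
    · rw [pvGoT.eq_def]; exact pvFilter_flush tokens buf
    · rw [pvGoS.eq_def]; exact pvFilter_flush tokens acc
  | cons c l ih =>
    refine ⟨fun tokens buf => ?_, fun tokens acc esc => ?_⟩
    · rw [List.foldl_cons]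
      by_cases h2 : c = '"'
      · subst h2
        rw [show pvStepA (tokens, buf, false, false) '"' =
            ((if buf ≠ [] then tokens ++ [("TEXT", String.ofList (PySem.Chars.strip buf))]
              else tokens), ['"'], true, false) from by simp [pvStepA]]
        rw [ih.2, pvFilter_flush]
        conv_rhs => rw [pvGoT.eq_def]
        simp
      · by_cases h3 : c = '{' ∨ c = '}' ∨ c = ','
        · rw [show pvStepA (tokens, buf, false, false) c =
              ((if buf ≠ [] then tokens ++ [("TEXT", String.ofList (PySem.Chars.strip buf))]
                else tokens) ++ [("SYNTAX", String.ofList [c])], [], false, false) from by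
                simp [pvStepA, h2, h3]]
          rw [ih.1, List.filter_append, pvFilter_flush]
          conv_rhs => rw [pvGoT.eq_def]
          simp [h2, h3, String.ofList_eq_empty_iff]
        · rw [show pvStepA (tokens, buf, false, false) c =
              (tokens, buf ++ [c], false, false) from by simp [pvStepA, h2, h3]]
          rw [ih.1]
          conv_rhs => rw [pvGoT.eq_def]
          simp [h2, h3]
    · rw [List.foldl_cons]
      cases esc with
      | true =>
        rw [show pvStepA (tokens, acc, true, true) c =
            (tokens, acc ++ [c], true, false) from by simp [pvStepA]]
        rw [ih.2]
        conv_rhs => rw [pvGoS.eq_def]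
        simp
      | false =>
        by_cases h2 : c = '\\'
        · rw [show pvStepA (tokens, acc, true, false) c =
              (tokens, acc ++ [c], true, true) from by simp [pvStepA, h2]]
          rw [ih.2]
          conv_rhs => rw [pvGoS.eq_def]
          simp [h2]
        · by_cases h3 : c = '"'
          · subst h3
            rw [show pvStepA (tokens, acc, true, false) '"' =
                (tokens ++ [("STRING", String.ofList (acc ++ ['"']))], [], false, false) from by
                  simp [pvStepA, h2]]
            rw [ih.1, List.filter_append]
            conv_rhs => rw [pvGoS.eq_def]
            simp [h2, String.ofList_eq_empty_iff]
          · rw [show pvStepA (tokens, acc, true, false) c =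
                (tokens, acc ++ [c], true, false) from by simp [pvStepA, h2, h3]]
            rw [ih.2]
            conv_rhs => rw [pvGoS.eq_def]
            simp [h2, h3]

-- pvGoB re-dispatches as one emit + continuation
theorem pvGoB_dispatch (l : List Char) :
    pvGoB l = pvEmit (l.takeWhile pvIsText) ++ pvGoB (l.dropWhile pvIsText) := by
  have hemp : pvEmit [] = [] := by decide
  cases l with
  | nil => simp [pvGoB, hemp]
  | cons c rest =>
    by_cases h1 : c = '{' ∨ c = '}' ∨ c = ','
    · have hc : pvIsText c = false := by
        rcases h1 with h | h | h <;> simp [pvIsText, h]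
      simp [hc, hemp, List.takeWhile_cons, List.dropWhile_cons]
    · by_cases h2 : c = '"'
      · have hc : pvIsText c = false := by simp [pvIsText, h2]
        simp [hc, hemp, List.takeWhile_cons, List.dropWhile_cons]
      · have hc : pvIsText c = true := by
          push_neg at h1
          simp [pvIsText, h2, h1.1, h1.2.1, h1.2.2]
        conv_lhs => rw [pvGoB.eq_def]
        simp [h1, h2, hc, List.takeWhile_cons, List.dropWhile_cons, pvEmit]

-- B's chunk scanner, related to the same reference tokenizer
theorem pvB_run (n : Nat) :
    ∀ l : List Char, l.length ≤ n →
      (∀ buf, pvGoT buf l = pvEmit (buf ++ l.takeWhile pvIsText) ++ pvGoB (l.dropWhile pvIsText)) ∧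
      (∀ acc, pvGoS acc false l =
        (let r := pvScanStr acc l
         if r.2.2 then ("STRING", String.ofList r.1) :: pvGoB r.2.1
         else pvEmit r.1 ++ pvGoB r.2.1)) := by
  induction n with
  | zero =>
    intro l h
    have hl : l = [] := by cases l <;> simp_all
    subst hl
    refine ⟨fun buf => ?_, fun acc => ?_⟩
    · rw [pvGoT.eq_def]
      simp [pvGoB]
    · rw [pvGoS.eq_def, pvScanStr.eq_def]
      simp [pvGoB]
  | succ n ih =>
    intro l h
    have hdis : ∀ l' : List Char, l'.length ≤ n → pvGoT [] l' = pvGoB l' := by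
      intro l' hl'
      rw [(ih l' hl').1 []]
      simpa using (pvGoB_dispatch l').symm
    cases l with
    | nil =>
      refine ⟨fun buf => ?_, fun acc => ?_⟩
      · rw [pvGoT.eq_def]
        simp [pvGoB]
      · rw [pvGoS.eq_def, pvScanStr.eq_def]
        simp [pvGoB]
    | cons c rest =>
      have hr : rest.length ≤ n := by simp at h; omega
      refine ⟨fun buf => ?_, fun acc => ?_⟩
      · by_cases h2 : c = '"'
        · subst h2
          have hc : pvIsText '"' = false := by decide
          have h3 : ¬('"' = '{' ∨ '"' = '}' ∨ '"' = ',') := by decide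
          rw [pvGoT.eq_def]
          conv_rhs => rw [pvGoB.eq_def]
          simp only [if_pos rfl, if_neg h3, hc, List.takeWhile_cons, List.dropWhile_cons,
            cond_false, Bool.false_eq_true, if_false, List.append_nil]
          rw [(ih rest hr).2 ['"']]
          by_cases hcl : (pvScanStr ['"'] rest).2.2 = true <;>
            simp [hcl, hc, pvEmit, List.append_assoc]
        · by_cases h3 : c = '{' ∨ c = '}' ∨ c = ','
          · have hc : pvIsText c = false := by
              rcases h3 with h' | h' | h' <;> simp [pvIsText, h']
            rw [pvGoT.eq_def]
            conv_rhs => rw [pvGoB.eq_def]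
            simp only [h2, if_neg h2, if_pos h3, hc, List.takeWhile_cons, List.dropWhile_cons,
              Bool.false_eq_true, if_false, List.append_nil]
            rw [hdis rest hr]
          · have hc : pvIsText c = true := by
              push_neg at h3
              simp [pvIsText, h2, h3.1, h3.2.1, h3.2.2]
            rw [pvGoT.eq_def]
            simp only [if_neg h2, if_neg h3]
            rw [(ih rest hr).1 (buf ++ [c])]
            simp [hc, List.takeWhile_cons, List.dropWhile_cons, List.append_assoc]
      · rw [pvGoS.eq_def]
        by_cases h2 : c = '\\'
        · have h3 : ¬(c = '"') := by simp [h2]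
          simp only [Bool.false_eq_true, if_false, if_pos h2]
          cases rest with
          | nil =>
            rw [pvGoS.eq_def, pvScanStr.eq_def]
            simp [h2, h3, pvGoB]
          | cons d rest' =>
            have hr' : rest'.length ≤ n := by simp at h; omega
            rw [pvGoS.eq_def]
            simp only [if_pos rfl]
            rw [(ih rest' hr').2 (acc ++ [c] ++ [d])]
            conv_rhs => rw [pvScanStr.eq_def]
            simp [h2, h3, List.append_assoc]
        · by_cases h3 : c = '"'
          · simp only [Bool.false_eq_true, if_false, if_neg h2, if_pos h3]
            conv_rhs => rw [pvScanStr.eq_def]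
            simp only [h3, if_pos rfl]
            rw [hdis rest hr]
            simp
          · simp only [Bool.false_eq_true, if_false, if_neg h2, if_neg h3]
            rw [(ih rest hr).2 (acc ++ [c])]
            conv_rhs => rw [pvScanStr.eq_def]
            simp [h2, h3]

theorem pvGoT_eq_pvGoB (l : List Char) : pvGoT [] l = pvGoB l := by
  rw [(pvB_run l.length l le_rfl).1 []]
  simpa using (pvGoB_dispatch l).symm

-- ===== VERDICT (by name: the statement is the Claim_ definition above) =====
theorem tokenize_go_dump_spec : Claim_equal_tokenize_go_dump := by
  intro text _
  show tokenize_go_dump text = tokenize_go_dump_alt text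
  unfold tokenize_go_dump tokenize_go_dump_alt
  rw [(pvA_run text.toList).1 [] []]
  simp [pvGoT_eq_pvGoB]
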